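-- pv_equiv track=rewrite | github.com/jason-conway/MAE3403 | HW1/HW1.py | SequenceSumClosestTo
-- ===== SOURCE A (Python) =====
-- def SequenceSumClosestTo(vals,thisSum):
--     smallestDiff, closestSum = 2**64, 2**64 #Starting values to compare against. Should be big enough for *almost* all cases
--     for i in range(len(vals)):
--         for j in range(i, len(vals)): #Lower bound for range needs to be the current value of i
--             tempSum = sum(vals[i:j + 1:1]) #Splice input array between correct indexes and sum the members
--             tempDiff = abs(tempSum - thisSum) #Scaler amount of deviance between current value and wanted value
--             if tempDiff < smallestDiff: #New value is closer to desired value than the previous, update new values and corresponding indice markers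
--                 smallestDiff, closestSum = tempDiff, tempSum #Update temp markers and new values and corresponding indice markers
--                 tempIndexI, tempIndexJ = i, j - i + 1 #Update indice markers corrosponding to our temp markers. Also correct length value to account for starting position and offset by one for clarity
--     return tempIndexI, tempIndexJ, closestSum
-- ===== SOURCE B (Python) =====
-- def SequenceSumClosestTo(vals, thisSum):
--     # Running (prefix) sums: each window sum extends the previous one in O(1),
--     # so the O(n) re-summation of every slice disappears -> O(n^2) total.
--     best = None  # (diff, startIndex, length, windowSum)
--     for i in range(len(vals)):
--         run = 0
--         length = 0
--         for v in vals[i:]: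
--             run += v
--             length += 1
--             d = abs(run - thisSum)
--             if best is None or d < best[0]:
--                 best = (d, i, length, run)
--     return best[1], best[2], best[3]
-- ===== Notes on version B (the rewrite author's own statement) =====
-- stated objective: faster
-- what changed: B keeps a running sum per start index so each window sum is an O(1) extension of the previous one, replacing A's per-window slice-and-sum; the uninitialized sentinel pair is replaced by a single best-tuple that starts at None.
-- outside the precondition, e.g. on SequenceSumClosestTo([], 0): A raises NameError, B raises TypeError
import Mathlib
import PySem

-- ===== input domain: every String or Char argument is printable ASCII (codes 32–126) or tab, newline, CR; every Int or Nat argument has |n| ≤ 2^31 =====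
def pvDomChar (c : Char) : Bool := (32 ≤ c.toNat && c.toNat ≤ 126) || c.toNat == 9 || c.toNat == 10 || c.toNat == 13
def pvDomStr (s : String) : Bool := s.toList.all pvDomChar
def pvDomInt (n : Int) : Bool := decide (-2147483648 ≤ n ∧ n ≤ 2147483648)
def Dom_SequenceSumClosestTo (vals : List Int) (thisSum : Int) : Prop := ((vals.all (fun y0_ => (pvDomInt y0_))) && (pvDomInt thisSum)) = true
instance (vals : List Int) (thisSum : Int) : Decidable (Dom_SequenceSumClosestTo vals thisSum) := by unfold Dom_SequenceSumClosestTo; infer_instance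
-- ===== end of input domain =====

-- B replaces A's per-window slice-and-sum by a running sum per start index (O(n^2) instead of O(n^3)); equivalence of return values on non-empty input.


-- ===== PORT A =====
def SequenceSumClosestTo (vals : List Int) (thisSum : Int) : Int × Int × Int :=
  let n : Int := (vals.length : Int)
  let st :=
    (PySem.List.pyRange 0 n 1).foldl (fun st i =>
      (PySem.List.pyRange i n 1).foldl (fun st j =>
        let tempSum := (PySem.List.slice vals (some i) (some (j + 1))).sum
        let tempDiff := |tempSum - thisSum|
        if tempDiff < st.1 then (tempDiff, tempSum, some (i, j - i + 1)) else st) st)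
      ((2 ^ 64 : Int), (2 ^ 64 : Int), (none : Option (Int × Int)))
  match st.2.2 with
  | some (a, b) => (a, b, st.2.1)
  | none => (0, 0, 0)  -- Python raises NameError here (tempIndexI never assigned); excluded by Pre_

-- ===== PORT B =====
def SequenceSumClosestTo_alt (vals : List Int) (thisSum : Int) : Int × Int × Int :=
  let n : Int := (vals.length : Int)
  let best :=
    (PySem.List.pyRange 0 n 1).foldl (fun best i =>
      ((PySem.List.slice vals (some i) none).foldl
        (fun (st : Int × Int × Option (Int × Int × Int × Int)) v =>
          let run := st.1 + v
          let length := st.2.1 + 1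
          let d := |run - thisSum|
          match st.2.2 with
          | none => (run, length, some (d, i, length, run))
          | some best' =>
            if d < best'.1 then (run, length, some (d, i, length, run))
            else (run, length, some best')) ((0 : Int), (0 : Int), best)).2.2)
      (none : Option (Int × Int × Int × Int))
  match best with
  | some (_, bi, bl, bs) => (bi, bl, bs)
  | none => (0, 0, 0)  -- Python raises TypeError here (best is None); excluded by Pre_

-- ===== PRECONDITION & SPEC =====
-- Pre_ excludes the empty list (both Pythons raise there) and requires the first element's
-- deviation to be below A's 2^64 sentinel; inside Dom the latter always holds (|v|,|thisSum| ≤ 2^31),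
-- so within Dom the only excluded inputs are the empty lists, on which A raises NameError.
def Pre_SequenceSumClosestTo (vals : List Int) (thisSum : Int) : Prop :=
  vals ≠ [] ∧ |vals.headI - thisSum| < 2 ^ 64
instance (vals : List Int) (thisSum : Int) : Decidable (Pre_SequenceSumClosestTo vals thisSum) := by
  unfold Pre_SequenceSumClosestTo; infer_instance
def pvWitness_SequenceSumClosestTo : List Int × Int := ([1, 2, -3], 2)

def Spec_SequenceSumClosestTo (vals : List Int) (thisSum : Int) (out : Int × Int × Int) : Prop := out = SequenceSumClosestTo_alt vals thisSum
instance (vals : List Int) (thisSum : Int) (out : Int × Int × Int) : Decidable (Spec_SequenceSumClosestTo vals thisSum out) := by unfold Spec_SequenceSumClosestTo; infer_instance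

-- ===== CLAIM (what is proved, stated in full; the proofs are below) =====
def Claim_equal_SequenceSumClosestTo : Prop := ∀ (vals : List Int) (thisSum : Int), Dom_SequenceSumClosestTo vals thisSum → Pre_SequenceSumClosestTo vals thisSum → Spec_SequenceSumClosestTo vals thisSum (SequenceSumClosestTo vals thisSum)

-- ===== LEMMAS AND PROOFS =====

-- A's selection step on one candidate (start index, length, window sum)
def pvStepA (t : Int) (st : Int × Int × Option (Int × Int)) (c : Int × Int × Int) : Int × Int × Option (Int × Int) :=
  if |c.2.2 - t| < st.1 then (|c.2.2 - t|, c.2.2, some (c.1, c.2.1)) else st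

-- B's selection step on one candidate
def pvStepB (t : Int) (b : Option (Int × Int × Int × Int)) (c : Int × Int × Int) : Option (Int × Int × Int × Int) :=
  match b with
  | none => some (|c.2.2 - t|, c.1, c.2.1, c.2.2)
  | some best' => if |c.2.2 - t| < best'.1 then some (|c.2.2 - t|, c.1, c.2.1, c.2.2) else some best'

def pvRel (st : Int × Int × Option (Int × Int)) (b : Option (Int × Int × Int × Int)) : Prop :=
  ∃ d a l s, st = (d, s, some (a, l)) ∧ b = some (d, a, l, s)

-- candidates contributed by start index i, in iteration order
def pvCands (vals : List Int) (i : Int) : List (Int × Int × Int) :=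
  (List.range (((vals.length : Int) - i)).toNat).map
    (fun (k : Nat) => (i, (k : Int) + 1, ((vals.drop i.toNat).take (k + 1)).sum))

lemma pvRel_step (t : Int) (st : Int × Int × Option (Int × Int)) (b : Option (Int × Int × Int × Int))
    (c : Int × Int × Int) (h : pvRel st b) : pvRel (pvStepA t st c) (pvStepB t b c) := by
  obtain ⟨d, a, l, s, rfl, rfl⟩ := h
  by_cases hd : |c.2.2 - t| < d
  · refine ⟨|c.2.2 - t|, c.1, c.2.1, c.2.2, ?_, ?_⟩ <;> simp [pvStepA, pvStepB, hd]
  · refine ⟨d, a, l, s, ?_, ?_⟩ <;> simp [pvStepA, pvStepB, hd]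

lemma pvRel_fold (t : Int) (cs : List (Int × Int × Int)) :
    ∀ st b, pvRel st b → pvRel (cs.foldl (pvStepA t) st) (cs.foldl (pvStepB t) b) := by
  induction cs with
  | nil => intro st b h; exact h
  | cons c cs ih => intro st b h; exact ih _ _ (pvRel_step t st b c h)

lemma pvInnerA (vals : List Int) (t : Int) (i : Int) (hi : 0 ≤ i) (st : Int × Int × Option (Int × Int)) :
    (PySem.List.pyRange i (vals.length : Int) 1).foldl
      (fun st j =>
        if |(PySem.List.slice vals (some i) (some (j + 1))).sum - t| < st.1 then
          (|(PySem.List.slice vals (some i) (some (j + 1))).sum - t|,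
           (PySem.List.slice vals (some i) (some (j + 1))).sum, some (i, j - i + 1))
        else st) st
    = (pvCands vals i).foldl (pvStepA t) st := by
  rw [PySem.List.pyRange_one, List.foldl_map]
  unfold pvCands
  rw [List.foldl_map]
  apply PySem.List.foldl_congr_mem
  intro acc k _
  have hb : (0 : Int) ≤ i + (k : Int) + 1 := by omega
  have h1 : PySem.List.slice vals (some i) (some (i + (k : Int) + 1))
      = (vals.drop i.toNat).take (k + 1) := by
    rw [PySem.List.slice_toNat vals hi hb]
    congr 1
    omega
  have h2 : i + (k : Int) - i + 1 = (k : Int) + 1 := by ring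
  simp only [pvStepA, h1, h2]

lemma pvInnerB (t : Int) (i : Int) :
    ∀ (tail : List Int) (r l : Int) (b : Option (Int × Int × Int × Int)),
    (tail.foldl
      (fun (st : Int × Int × Option (Int × Int × Int × Int)) v =>
        match st.2.2 with
        | none => (st.1 + v, st.2.1 + 1, some (|st.1 + v - t|, i, st.2.1 + 1, st.1 + v))
        | some best' =>
          if |st.1 + v - t| < best'.1 then (st.1 + v, st.2.1 + 1, some (|st.1 + v - t|, i, st.2.1 + 1, st.1 + v))
          else (st.1 + v, st.2.1 + 1, some best')) (r, l, b)).2.2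
    = ((List.range tail.length).map
        (fun (k : Nat) => (i, l + (k : Int) + 1, r + (tail.take (k + 1)).sum))).foldl (pvStepB t) b := by
  intro tail
  induction tail with
  | nil => intro r l b; simp
  | cons v tl ih =>
    intro r l b
    have hmap : (List.range (v :: tl).length).map
        (fun (k : Nat) => (i, l + (k : Int) + 1, r + ((v :: tl).take (k + 1)).sum))
        = (i, l + 1, r + v) ::
          (List.range tl.length).map (fun (k : Nat) => (i, (l + 1) + (k : Int) + 1, (r + v) + (tl.take (k + 1)).sum)) := by
      rw [List.length_cons, List.range_succ_eq_map, List.map_cons, List.map_map]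
      refine congrArg₂ _ (by norm_num) (List.map_congr_left ?_)
      intro k _
      simp only [Function.comp]
      push_cast
      refine congrArg₂ _ rfl (congrArg₂ _ (by ring) ?_)
      rw [List.take_succ_cons, List.sum_cons]
      ring
    rw [hmap]
    cases b with
    | none =>
      simp only [List.foldl_cons, pvStepB]
      exact ih (r + v) (l + 1) _
    | some best' =>
      simp only [List.foldl_cons, pvStepB]
      by_cases hd : |r + v - t| < best'.1 <;> simp only [hd, if_true, if_false] <;>
        exact ih (r + v) (l + 1) _

lemma pvMain (vals : List Int) (t : Int) (h1 : vals ≠ []) (h2 : |vals.headI - t| < 2 ^ 64) :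
    SequenceSumClosestTo vals t = SequenceSumClosestTo_alt vals t := by
  obtain ⟨v, vs, rfl⟩ := List.exists_cons_of_ne_nil h1
  have hd0 : |v - t| < 2 ^ 64 := by simpa using h2
  simp only [SequenceSumClosestTo, SequenceSumClosestTo_alt]
  have hA : (PySem.List.pyRange 0 ((v :: vs).length : Int) 1).foldl
      (fun st i =>
        (PySem.List.pyRange i ((v :: vs).length : Int) 1).foldl
          (fun st j =>
            if |(PySem.List.slice (v :: vs) (some i) (some (j + 1))).sum - t| < st.1 then
              (|(PySem.List.slice (v :: vs) (some i) (some (j + 1))).sum - t|,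
               (PySem.List.slice (v :: vs) (some i) (some (j + 1))).sum, some (i, j - i + 1))
            else st) st)
      ((2 ^ 64 : Int), (2 ^ 64 : Int), (none : Option (Int × Int)))
      = ((PySem.List.pyRange 0 ((v :: vs).length : Int) 1).flatMap (pvCands (v :: vs))).foldl
          (pvStepA t) ((2 ^ 64 : Int), (2 ^ 64 : Int), (none : Option (Int × Int))) := by
    rw [List.foldl_flatMap]
    apply PySem.List.foldl_congr_mem
    intro acc i hi
    exact pvInnerA (v :: vs) t i (PySem.List.mem_pyRange_one.mp hi).1 acc
  have hB : (PySem.List.pyRange 0 ((v :: vs).length : Int) 1).foldl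
      (fun best i =>
        ((PySem.List.slice (v :: vs) (some i) none).foldl
          (fun (st : Int × Int × Option (Int × Int × Int × Int)) w =>
            match st.2.2 with
            | none => (st.1 + w, st.2.1 + 1, some (|st.1 + w - t|, i, st.2.1 + 1, st.1 + w))
            | some best' =>
              if |st.1 + w - t| < best'.1 then (st.1 + w, st.2.1 + 1, some (|st.1 + w - t|, i, st.2.1 + 1, st.1 + w))
              else (st.1 + w, st.2.1 + 1, some best')) ((0 : Int), (0 : Int), best)).2.2)
      (none : Option (Int × Int × Int × Int))
      = ((PySem.List.pyRange 0 ((v :: vs).length : Int) 1).flatMap (pvCands (v :: vs))).foldl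
          (pvStepB t) (none : Option (Int × Int × Int × Int)) := by
    rw [List.foldl_flatMap]
    apply PySem.List.foldl_congr_mem
    intro acc i hi
    have hi0 : (0 : Int) ≤ i := (PySem.List.mem_pyRange_one.mp hi).1
    rw [PySem.List.slice_from _ hi0, pvInnerB t i]
    congr 1
    have hlen : (((v :: vs).length : Int) - i).toNat = ((v :: vs).drop i.toNat).length := by
      simp [List.length_drop]
      omega
    unfold pvCands
    rw [hlen]
    exact List.map_congr_left (fun k _ => by simp)
  rw [hA, hB]
  have hlen1 : (0 : Int) < ((v :: vs).length : Int) := by exact_mod_cast Nat.succ_pos vs.length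
  have hsplit : PySem.List.pyRange 0 ((v :: vs).length : Int) 1
      = 0 :: PySem.List.pyRange (0 + 1) ((v :: vs).length : Int) 1 :=
    PySem.List.pyRange_one_cons hlen1
  have hc : pvCands (v :: vs) 0 = ((0 : Int), (1 : Int), v) ::
      (List.range vs.length).map
        ((fun (k : Nat) => ((0 : Int), (k : Int) + 1, (((v :: vs).drop (0 : Int).toNat).take (k + 1)).sum)) ∘ Nat.succ) := by
    unfold pvCands
    rw [show ((((v :: vs).length : Int)) - 0).toNat = vs.length + 1 by simp,
      List.range_succ_eq_map, List.map_cons, List.map_map]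
    congr 1
    simp
  obtain ⟨tail, htail⟩ : ∃ tail, pvCands (v :: vs) 0
      = ((0 : Int), (1 : Int), v) :: tail := ⟨_, hc⟩
  rw [hsplit, List.flatMap_cons, htail, List.cons_append, List.foldl_cons, List.foldl_cons]
  have e1 : pvStepA t ((2 ^ 64 : Int), (2 ^ 64 : Int), (none : Option (Int × Int))) ((0 : Int), (1 : Int), v)
      = (|v - t|, v, some ((0 : Int), (1 : Int))) := by
    unfold pvStepA
    rw [if_pos (show |((0 : Int), (1 : Int), v).2.2 - t| < ((2 ^ 64 : Int), (2 ^ 64 : Int), (none : Option (Int × Int))).1 from hd0)]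
  have e2 : pvStepB t (none : Option (Int × Int × Int × Int)) ((0 : Int), (1 : Int), v)
      = some (|v - t|, (0 : Int), (1 : Int), v) := by
    simp [pvStepB]
  rw [e1, e2]
  obtain ⟨d, a, l, s, hA', hB'⟩ :=
    pvRel_fold t (tail ++ (PySem.List.pyRange (0 + 1) ((v :: vs).length : Int) 1).flatMap (pvCands (v :: vs)))
      _ _ ⟨|v - t|, 0, 1, v, rfl, rfl⟩
  rw [hA', hB']

-- ===== VERDICT (by name: the statement is the Claim_ definition above) =====
theorem SequenceSumClosestTo_spec : Claim_equal_SequenceSumClosestTo := by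
  intro vals thisSum _ hPre
  simp only [Spec_SequenceSumClosestTo]
  exact pvMain vals thisSum hPre.1 hPre.2
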